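-- pv_equiv track=rewrite | github.com/PolrapatCom/My-Profile | Code/Python/python/0090.py | check
-- ===== SOURCE A (Python) =====
-- w = 4
--
-- h = 3
--
-- table = [
--   "x...",
--   "...x",
--   "x...",
-- ]
--
-- def check(x,y):
--     for i in range(-1,2,1):
--         for j in range(-1,2,1):
--             r = x + i
--             c = y + j
--             if(r>=0 and c>=0 and r<h and c<w):
--                 pass
--             else:
--                 continue
--             if(r==x and c==y):
--                 continue
--             if(table[r][c]=="x"):
--                 return True
-- ===== SOURCE B (Python) =====
-- w = 4
--
-- h = 3
--
-- table = [
--   "x...",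
--   "...x",
--   "x...",
-- ]
--
-- # precomputed coordinates of all 'x' cells
-- _xcells = [(r, c) for r, row in enumerate(table) for c, ch in enumerate(row) if ch == "x"]
--
-- def check(x, y):
--     for (r, c) in _xcells:
--         if (r, c) != (x, y) and abs(r - x) <= 1 and abs(c - y) <= 1:
--             return True
-- ===== Notes on version B (the rewrite author's own statement) =====
-- stated objective: alternative
-- what changed: B precomputes the list of 'x'-cell coordinates once and scans that list testing Chebyshev distance <= 1, instead of A's nested 3x3 offset loops with bounds checks and table indexing.
import Mathlib
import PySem

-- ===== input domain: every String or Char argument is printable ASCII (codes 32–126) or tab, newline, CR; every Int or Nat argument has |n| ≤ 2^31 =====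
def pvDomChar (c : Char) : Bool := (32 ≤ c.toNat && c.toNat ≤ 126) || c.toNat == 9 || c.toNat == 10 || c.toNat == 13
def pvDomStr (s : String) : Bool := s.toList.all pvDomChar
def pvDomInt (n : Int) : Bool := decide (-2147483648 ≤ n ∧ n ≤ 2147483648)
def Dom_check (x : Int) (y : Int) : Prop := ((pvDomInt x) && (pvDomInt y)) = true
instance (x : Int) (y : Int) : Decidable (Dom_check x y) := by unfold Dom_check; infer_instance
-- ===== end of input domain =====

-- B scans a precomputed list of the 'x'-cell coordinates testing Chebyshev distance ≤ 1,
-- instead of A's nested 3×3 offset loops with bounds checks and table indexing (objective: alternative).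

-- ===== PORT A =====
def tableA : List String := ["x...", "...x", "x..."]

-- inner loop 'for j in ...' of A
def checkInner (x : Int) (y : Int) (i : Int) : List Int → Option Bool
  | [] => none
  | j :: js =>
    let r := x + i
    let c := y + j
    if ¬(r ≥ 0 ∧ c ≥ 0 ∧ r < 3 ∧ c < 4) then checkInner x y i js
    else if r = x ∧ c = y then checkInner x y i js
    else if ((PySem.List.pyGet? tableA r).bind (fun s => PySem.Str.pyGet? s c)) = some 'x' then some true
    else checkInner x y i js

-- outer loop 'for i in ...' of A
def checkOuter (x : Int) (y : Int) : List Int → Option Bool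
  | [] => none
  | i :: is =>
    match checkInner x y i (PySem.List.pyRange (-1) 2 1) with
    | some b => some b
    | none => checkOuter x y is

def check (x : Int) (y : Int) : Option Bool :=
  checkOuter x y (PySem.List.pyRange (-1) 2 1)

-- ===== PORT B =====
-- precomputed coordinates of all 'x' cells, as in Source B's module-level comprehension
def xcells : List (Int × Int) :=
  (PySem.List.enumerate tableA 0).flatMap (fun p =>
    (PySem.List.enumerate p.2.toList 0).filterMap (fun q =>
      if q.2 = 'x' then some (p.1, q.1) else none))

def checkAltLoop (x : Int) (y : Int) : List (Int × Int) → Option Bool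
  | [] => none
  | (r, c) :: rest =>
    if (r, c) ≠ (x, y) ∧ (r - x).natAbs ≤ 1 ∧ (c - y).natAbs ≤ 1 then some true
    else checkAltLoop x y rest

def check_alt (x : Int) (y : Int) : Option Bool :=
  checkAltLoop x y xcells

-- ===== PRECONDITION & SPEC =====
def Spec_check (x : Int) (y : Int) (out : Option Bool) : Prop := out = check_alt x y
instance (x : Int) (y : Int) (out : Option Bool) : Decidable (Spec_check x y out) := by unfold Spec_check; infer_instance

-- ===== CLAIM (what is proved, stated in full; the proofs are below) =====
def Claim_equal_check : Prop := ∀ (x : Int) (y : Int), Dom_check x y → Spec_check x y (check x y)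

-- ===== LEMMAS AND PROOFS =====
theorem xcells_eq : xcells = [(0, 0), (1, 3), (2, 0)] := by decide

theorem checkInner_none (x y i : Int) : ∀ l : List Int,
    (∀ j ∈ l, ¬(x + i ≥ 0 ∧ y + j ≥ 0 ∧ x + i < 3 ∧ y + j < 4)) → checkInner x y i l = none := by
  intro l
  induction l with
  | nil => intro _; rfl
  | cons j js ih =>
    intro h
    simp only [checkInner]
    rw [if_pos (h j (by simp))]
    exact ih (fun j' hj' => h j' (by simp [hj']))

theorem checkOuter_none (x y : Int) : ∀ l : List Int,
    (∀ i ∈ l, checkInner x y i (PySem.List.pyRange (-1) 2 1) = none) → checkOuter x y l = none := by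
  intro l
  induction l with
  | nil => intro _; rfl
  | cons i is ih =>
    intro h
    simp only [checkOuter]
    rw [h i (by simp)]
    exact ih (fun i' hi' => h i' (by simp [hi']))

theorem check_far (x y : Int) (h : x < -1 ∨ 3 < x ∨ y < -1 ∨ 4 < y) : check x y = none := by
  refine checkOuter_none x y _ (fun i hi => checkInner_none x y i _ (fun j hj => ?_))
  rw [PySem.List.mem_pyRange_one] at hi hj
  omega

theorem check_alt_far (x y : Int) (h : x < -1 ∨ 3 < x ∨ y < -1 ∨ 4 < y) :
    check_alt x y = none := by
  simp only [check_alt, xcells_eq, checkAltLoop]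
  split_ifs with h1 h2 h3
  · exact absurd h1.2 (by omega)
  · exact absurd h2.2 (by omega)
  · exact absurd h3.2 (by omega)
  · rfl

-- ===== VERDICT (by name: the statement is the Claim_ definition above) =====
theorem check_spec : Claim_equal_check := by
  intro x y _
  show check x y = check_alt x y
  by_cases hx : -1 ≤ x ∧ x ≤ 3 ∧ -1 ≤ y ∧ y ≤ 4
  · obtain ⟨h1, h2, h3, h4⟩ := hx
    interval_cases x <;> interval_cases y <;> decide
  · rw [check_far, check_alt_far] <;> omega
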